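-- pv_equiv track=rewrite | github.com/qpwisu/algorithm | 프로그래머스/3/389481. 봉인된 주문/봉인된 주문.py | solution
-- ===== SOURCE A (Python) =====
-- def solution(n, bans):
--     answer = ''
--
--     # 문자 길이 구하는 함수 (남겨두되, 실사용은 줄임)
--     def length(n):
--         l = 0
--         a = 1
--         while 1:
--             l += 1
--             a = a * 26
--             if n <= a:
--                 break
--         return l
--
--     l = length(n)  # 유지 (필수는 아님)
--
--     # 각 자리의 ord 리스트(97~122)로 변환 - bijective 26진수
--     # 예: 1->"a", 26->"z", 27->"aa"
--     def ord_li(x):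
--         if x <= 0:
--             return [97]  # 안전장치
--         li = []
--         while x > 0:
--             x -= 1
--             li.append((x % 26) + 97)
--             x //= 26
--         li.reverse()
--         return li
--
--     # ord 리스트 -> 문자열
--     def change_str(li):
--         w = ""
--         for i in range(len(li)):
--             w = w + chr(li[i])
--         return w
--
--     # 문자열 -> 순위(정수). 'a'->1, ..., 'z'->26, 'aa'->27 ...
--     def to_rank(s):
--         k = 0
--         for ch in s:
--             k = k * 26 + (ord(ch) - 96)
--         return k
--
--     # --- 금지어를 순위로 변환 후 정렬/중복제거 ---
--     ban_ranks = sorted({to_rank(b) for b in bans if b})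
--
--     # --- n을 금지어만큼 밀어주는 고정점 계산 ---
--     # ban_rank <= n+cnt 인 동안 cnt 증가
--     cnt = 0
--     i = 0
--     L = len(ban_ranks)
--     while i < L and ban_ranks[i] <= n + cnt:
--         cnt += 1
--         i += 1
--
--     # 최종 목표 순위
--     target = n + cnt
--
--     # 최종 순위를 문자열로 변환
--     li = ord_li(target)
--     answer = change_str(li)
--     return answer
-- ===== SOURCE B (Python) =====
-- def solution(n, bans):
--     # rank of a word in bijective base 26: 'a'->1 ... 'z'->26, 'aa'->27 ...
--     def to_rank(s):
--         k = 0
--         for ch in s: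
--             k = k * 26 + (ord(ch) - 96)
--         return k
--
--     ranks = sorted({to_rank(b) for b in bans if b})
--
--     # binary search for the smallest t in [n, n+len(ranks)] such that
--     # t minus the number of banned ranks <= t is at least n
--     lo, hi = n, n + len(ranks)
--     while lo < hi:
--         mid = (lo + hi) // 2
--         if mid - sum(1 for r in ranks if r <= mid) >= n:
--             hi = mid
--         else:
--             lo = mid + 1
--     target = lo
--
--     # rank -> word, building the string front-to-back by prepending digits
--     if target <= 0:
--         return "a"
--     s = ""
--     while target > 0:
--         target, d = divmod(target - 1, 26)
--         s = chr(97 + d) + s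
--     return s
-- ===== Notes on version B (the rewrite author's own statement) =====
-- stated objective: alternative
-- what changed: The incremental fixed-point walk over the sorted banned ranks is replaced by a binary search on [n, n+len(ranks)] for the smallest target t with t - #{banned ranks <= t} >= n, and the rank-to-word conversion builds the string by prepending digits instead of appending to a list, reversing and joining.
import Mathlib
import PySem

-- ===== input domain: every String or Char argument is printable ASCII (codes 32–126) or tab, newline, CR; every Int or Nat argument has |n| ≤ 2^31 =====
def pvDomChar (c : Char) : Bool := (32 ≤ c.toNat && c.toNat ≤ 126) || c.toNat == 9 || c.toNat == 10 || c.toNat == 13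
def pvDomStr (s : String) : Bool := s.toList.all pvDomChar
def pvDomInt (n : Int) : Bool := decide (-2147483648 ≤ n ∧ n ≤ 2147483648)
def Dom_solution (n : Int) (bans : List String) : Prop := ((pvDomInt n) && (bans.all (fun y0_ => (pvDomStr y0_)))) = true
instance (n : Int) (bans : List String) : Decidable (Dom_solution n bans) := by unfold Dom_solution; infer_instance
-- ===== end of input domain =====

-- B replaces A's incremental fixed-point walk over the sorted banned ranks by a binary
-- search for the target rank, and builds the answer string by prepending digits instead
-- of append-reverse-join (alternative decomposition, same asymptotic cost).


-- ===== PORT A =====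
-- chr(x) for the code points this program produces (97..122); exact there
def pyChr (x : Int) : Char := Char.ofNat x.toNat

-- inner 'length' while-loop: l += 1; a *= 26; break when n <= a
def lengthGoA (n : Int) (l : Int) (a : Int) (ha : 0 < a) : Int :=
  if n ≤ a * 26 then l + 1
  else lengthGoA n (l + 1) (a * 26) (by omega)
termination_by (n - a).toNat
decreasing_by omega

def lengthA (n : Int) : Int := lengthGoA n 0 1 (by omega)

-- ord_li while-loop: x -= 1; li.append(x % 26 + 97); x //= 26
def ordLiGoA (x : Int) (li : List Int) : List Int :=
  if x > 0 then
    ordLiGoA (PySem.Int.floordiv (x - 1) 26) (li ++ [PySem.Int.mod (x - 1) 26 + 97])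
  else li
termination_by x.toNat
decreasing_by
  rw [PySem.Int.floordiv_eq_ediv_of_pos (by omega)]; omega

def ordLiA (x : Int) : List Int :=
  if x ≤ 0 then [97]
  else (ordLiGoA x []).reverse

-- change_str: w = ""; for i in range(len(li)): w = w + chr(li[i])  (string as List Char)
def changeStrA (li : List Int) : List Char :=
  li.foldl (fun w c => w ++ [pyChr c]) []

-- to_rank: k = 0; for ch in s: k = k*26 + (ord(ch) - 96)
def toRankA (s : String) : Int :=
  s.toList.foldl (fun k ch => k * 26 + ((ch.toNat : Int) - 96)) 0

-- while i < L and ban_ranks[i] <= n + cnt: cnt += 1; i += 1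
def walkA (r : List Int) (n : Int) (cnt : Int) : Int :=
  match r with
  | [] => cnt
  | x :: xs => if x ≤ n + cnt then walkA xs n (cnt + 1) else cnt

def solution (n : Int) (bans : List String) : String :=
  let _l := lengthA n
  let banRanks :=
    PySem.List.sorted (PySem.Set.ofList ((bans.filter (fun b => b ≠ "")).map toRankA)) (fun x => x)
  let cnt := walkA banRanks n 0
  let target := n + cnt
  String.ofList (changeStrA (ordLiA target))

-- ===== PORT B =====
def toRankB (s : String) : Int :=
  s.toList.foldl (fun k ch => k * 26 + ((ch.toNat : Int) - 96)) 0

-- binary search: while lo < hi: mid = (lo+hi)//2; keep mid iff mid - #{r <= mid} >= n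
def bsGoB (ranks : List Int) (n lo hi : Int) : Int :=
  if lo < hi then
    if n ≤ PySem.Int.floordiv (lo + hi) 2 -
        (ranks.map (fun r => if r ≤ PySem.Int.floordiv (lo + hi) 2 then (1 : Int) else 0)).sum then
      bsGoB ranks n lo (PySem.Int.floordiv (lo + hi) 2)
    else
      bsGoB ranks n (PySem.Int.floordiv (lo + hi) 2 + 1) hi
  else lo
termination_by (hi - lo).toNat
decreasing_by
  · have h := PySem.Int.floordiv_two_mid_bounds (le_of_lt (by omega : lo < hi))
    have h2 : PySem.Int.floordiv (lo + hi) 2 < hi :=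
      (PySem.Int.floordiv_lt_iff_lt_mul (by omega)).mpr (by omega)
    omega
  · have h := PySem.Int.floordiv_two_mid_bounds (le_of_lt (by omega : lo < hi))
    omega

-- rank -> word, prepending digits: target, d = divmod(target-1, 26); s = chr(97+d) + s
def toStrGoB (x : Int) (s : List Char) : List Char :=
  if x > 0 then
    toStrGoB (PySem.Int.floordiv (x - 1) 26) (pyChr (97 + PySem.Int.mod (x - 1) 26) :: s)
  else s
termination_by x.toNat
decreasing_by
  rw [PySem.Int.floordiv_eq_ediv_of_pos (by omega)]; omega

def solution_alt (n : Int) (bans : List String) : String :=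
  let ranks :=
    PySem.List.sorted (PySem.Set.ofList ((bans.filter (fun b => b ≠ "")).map toRankB)) (fun x => x)
  let target := bsGoB ranks n n (n + ranks.length)
  if target ≤ 0 then "a" else String.ofList (toStrGoB target [])

-- ===== PRECONDITION & SPEC =====
def Spec_solution (n : Int) (bans : List String) (out : String) : Prop := out = solution_alt n bans
instance (n : Int) (bans : List String) (out : String) : Decidable (Spec_solution n bans out) := by unfold Spec_solution; infer_instance

-- ===== CLAIM (what is proved, stated in full; the proofs are below) =====
def Claim_equal_solution : Prop := ∀ (n : Int) (bans : List String), Dom_solution n bans → Spec_solution n bans (solution n bans)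

-- ===== LEMMAS AND PROOFS =====

-- walkA's count only grows
theorem walkA_ge (r : List Int) (n : Int) : ∀ cnt, cnt ≤ walkA r n cnt := by
  induction r with
  | nil => intro cnt; simp [walkA]
  | cons x xs ih =>
    intro cnt
    simp only [walkA]
    split
    · have := ih (cnt + 1); omega
    · omega

-- walkA adds at most the number of remaining ranks
theorem walkA_le (r : List Int) (n : Int) : ∀ cnt, walkA r n cnt ≤ cnt + r.length := by
  induction r with
  | nil => intro cnt; simp [walkA]
  | cons x xs ih =>
    intro cnt
    simp only [walkA]
    split
    · have := ih (cnt + 1); simp only [List.length_cons]; omega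
    · simp only [List.length_cons]; omega

-- a strictly increasing list whose elements all exceed m has at most t - m elements ≤ t
theorem countLe_bound (r : List Int) (hp : r.Pairwise (· < ·)) :
    ∀ m t : Int, (∀ y ∈ r, m < y) → m ≤ t →
      (r.countP (fun x => decide (x ≤ t)) : Int) ≤ t - m := by
  induction r with
  | nil => intro m t _ h; simp; omega
  | cons x xs ih =>
    intro m t hgt hmt
    have hx : m < x := hgt x (by simp)
    have hxs : xs.Pairwise (· < ·) := hp.of_cons
    have hxgt : ∀ y ∈ xs, x < y := fun y hy => (List.pairwise_cons.mp hp).1 y hy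
    by_cases hxt : x ≤ t
    · have h1 := ih hxs x t hxgt hxt
      simp only [List.countP_cons, hxt, decide_true]
      push_cast
      omega
    · have hzero : xs.countP (fun x => decide (x ≤ t)) = 0 := by
        apply List.countP_eq_zero.mpr
        intro y hy
        have : x < y := hxgt y hy
        simp; omega
      simp only [List.countP_cons, hxt, decide_false, hzero]
      simp; omega

-- characterization: for t ≥ n + cnt, #{x ∈ r : x ≤ t} ≤ t - n - cnt  iff  walkA r n cnt ≤ t - n
theorem walkA_char (r : List Int) (hp : r.Pairwise (· < ·)) :
    ∀ (n cnt t : Int), n + cnt ≤ t →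
      ((r.countP (fun x => decide (x ≤ t)) : Int) ≤ t - n - cnt ↔ walkA r n cnt ≤ t - n) := by
  induction r with
  | nil => intro n cnt t h; simp only [walkA, List.countP_nil, Nat.cast_zero]; omega
  | cons x xs ih =>
    intro n cnt t h
    have hxs : xs.Pairwise (· < ·) := hp.of_cons
    have hxgt : ∀ y ∈ xs, x < y := fun y hy => (List.pairwise_cons.mp hp).1 y hy
    simp only [walkA]
    split
    · rename_i hx
      have hxt : x ≤ t := by omega
      simp only [List.countP_cons, hxt, decide_true]
      by_cases h1 : n + (cnt + 1) ≤ t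
      · have hiff := ih hxs n (cnt + 1) t h1
        push_cast
        omega
      · -- t = n + cnt: both sides false
        have hw := walkA_ge xs n (cnt + 1)
        push_cast
        omega
    · rename_i hx
      constructor
      · intro _; omega
      · intro _
        have hb := countLe_bound (x :: xs) hp (n + cnt) t
          (by
            intro y hy
            rcases List.mem_cons.mp hy with h' | h'
            · omega
            · have := hxgt y h'; omega)
          (by omega)
        omega

-- binary search computes A's fixed point
theorem bsGoB_eq (r : List Int) (hp : r.Pairwise (· < ·)) (n : Int) :
    ∀ lo hi, n ≤ lo → lo ≤ n + walkA r n 0 → n + walkA r n 0 ≤ hi →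
      bsGoB r n lo hi = n + walkA r n 0 := by
  intro lo hi
  induction hk : (hi - lo).toNat using Nat.strong_induction_on generalizing lo hi with
  | _ k ihk =>
  intro hnlo hlot hthi
  rw [bsGoB]
  split
  · rename_i hlh
    have hmid := PySem.Int.floordiv_two_mid_bounds (le_of_lt hlh)
    have hmidlt : PySem.Int.floordiv (lo + hi) 2 < hi :=
      (PySem.Int.floordiv_lt_iff_lt_mul (by omega)).mpr (by omega)
    set mid := PySem.Int.floordiv (lo + hi) 2 with hmiddef
    have hsum : (r.map (fun x => if x ≤ mid then (1 : Int) else 0)).sum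
        = (r.countP (fun x => decide (x ≤ mid)) : Int) := by
      rw [← PySem.List.sum_map_ite_one_zero (fun x => decide (x ≤ mid)) r]
      simp
    rw [hsum]
    have hchar := walkA_char r hp n 0 mid (by omega)
    split
    · rename_i hcond
      have ht : n + walkA r n 0 ≤ mid := by
        have := hchar.mp (by omega); omega
      exact ihk (mid - lo).toNat (by omega) lo mid rfl hnlo hlot ht
    · rename_i hcond
      have ht : mid < n + walkA r n 0 := by
        by_contra hcon
        have := hchar.mpr (by omega)
        omega
      exact ihk (hi - (mid + 1)).toNat (by omega) (mid + 1) hi rfl (by omega) (by omega) hthi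
  · omega

-- A's digit loop followed by reverse equals B's prepending loop (strings as char lists)
theorem toStrGoB_eq_ordLiGoA (x : Int) : ∀ li : List Int,
    toStrGoB x ((li.map pyChr).reverse) = ((ordLiGoA x li).map pyChr).reverse := by
  induction hx : x.toNat using Nat.strong_induction_on generalizing x with
  | _ k ihk =>
  intro li
  rw [toStrGoB, ordLiGoA]
  split
  · rename_i hpos
    have hq : (PySem.Int.floordiv (x - 1) 26).toNat < k := by
      rw [PySem.Int.floordiv_eq_ediv_of_pos (by omega)]
      omega
    have hih := ihk _ hq (PySem.Int.floordiv (x - 1) 26) rfl (li ++ [PySem.Int.mod (x - 1) 26 + 97])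
    rw [Int.add_comm 97, ← hih]
    rw [List.map_append, List.reverse_append]
    rfl
  · rfl

-- ===== VERDICT (by name: the statement is the Claim_ definition above) =====
theorem solution_spec : Claim_equal_solution := by
  unfold Claim_equal_solution
  intro n bans _
  unfold Spec_solution solution solution_alt
  have hrank : toRankB = toRankA := rfl
  rw [hrank]
  dsimp only
  set r := PySem.List.sorted (PySem.Set.ofList ((bans.filter (fun b => b ≠ "")).map toRankA)) (fun x => x) with hr
  have hp : r.Pairwise (· < ·) := PySem.List.sorted_ofList_pairwise_lt _
  have hge := walkA_ge r n 0
  have hle := walkA_le r n 0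
  have htarget : bsGoB r n n (n + r.length) = n + walkA r n 0 :=
    bsGoB_eq r hp n n (n + r.length) (by omega) (by omega) (by omega)
  rw [htarget]
  set t := n + walkA r n 0 with ht
  by_cases htle : t ≤ 0
  · simp only [htle, if_true, ordLiA]
    rfl
  · simp only [htle, if_false, ordLiA]
    have hts := toStrGoB_eq_ordLiGoA t []
    simp only [List.map_nil, List.reverse_nil] at hts
    rw [hts]
    congr 1
    unfold changeStrA
    rw [PySem.List.foldl_append_singleton_eq_map]
    simp
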